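-- pv_equiv track=rewrite | github.com/or-m-or/KT-AIVLE-School-5th_Codingmasters | example/round2/Intermediate/Q8704_나이트자리바꾸기/A8704.py | solution
-- ===== SOURCE A (Python) =====
-- from collections import deque
--
-- def solution(start_board):
--     moves = [(-1, 2), (1, 2), (-2, 1), (-2, -1), (2, -1), (2, 1), (-1, -2), (1, -2)]
--
--     start = []
--     goal = []
--
--     for i in range(3):
--         for j in range(3):
--             if start_board[i][j] == '1':
--                 start.append((i, j, '1'))
--                 goal.append((i, j, '2'))
--             elif start_board[i][j] == '2':
--                 start.append((i, j, '2'))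
--                 goal.append((i, j, '1'))
--
--     start = tuple(sorted(start, key=lambda x: (x[2], x[0], x[1])))
--     goal = tuple(sorted(goal, key=lambda x: (x[2], x[0], x[1])))
--
--     queue = deque([start])
--     seen = set()
--     seen.add(start)
--
--     while queue:
--         current = queue.popleft()
--
--         if current == goal:
--             return "possible"
--
--         for i, (x, y, color) in enumerate(current):
--             for dx, dy in moves:
--                 nx, ny = x + dx, y + dy
--                 if 0 <= nx < 3 and 0 <= ny < 3:
--                     if not any(nx == cx and ny == cy for cx, cy, c in current):
--                         new_pos = (nx, ny, color)
--                         new_state = list(current)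
--                         new_state[i] = new_pos
--                         new_state = tuple(sorted(new_state, key=lambda x: (x[2], x[0], x[1])))
--                         if new_state not in seen:
--                             seen.add(new_state)
--                             queue.append(new_state)
--
--     return "impossible"
-- ===== SOURCE B (Python) =====
-- def solution(start_board):
--     moves = [(-1, 2), (1, 2), (-2, 1), (-2, -1), (2, -1), (2, 1), (-1, -2), (1, -2)]
--     key = lambda t: (t[2], t[0], t[1])
--
--     cells = [(i, j, start_board[i][j]) for i in range(3) for j in range(3)]
--     start = tuple(sorted([(i, j, c) for i, j, c in cells if c in ('1', '2')], key=key))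
--     goal = tuple(sorted([(i, j, '2' if c == '1' else '1')
--                          for i, j, c in cells if c in ('1', '2')], key=key))
--
--     states = {start}
--     stack = [start]
--     while stack:
--         s = stack.pop()
--         occ = {(x, y) for x, y, _ in s}
--         for idx, (x, y, c) in enumerate(s):
--             for dx, dy in moves:
--                 nx, ny = x + dx, y + dy
--                 if 0 <= nx < 3 and 0 <= ny < 3 and (nx, ny) not in occ:
--                     t = tuple(sorted(s[:idx] + ((nx, ny, c),) + s[idx + 1:], key=key))
--                     if t not in states:
--                         states.add(t)
--                         stack.append(t)
--
--     return "possible" if goal in states else "impossible"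
-- ===== Notes on version B (the rewrite author's own statement) =====
-- stated objective: alternative
-- what changed: A's FIFO-queue BFS with an early goal-equality exit on each popped state is replaced by a stack-driven (LIFO, depth-first) saturation of the whole reachable state component followed by a single membership test of the goal state; the board is parsed by one comprehension plus filtering instead of A's two nested appending loops, and occupancy is tested against a precomputed position set instead of A's inner any() scan.
import Mathlib
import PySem

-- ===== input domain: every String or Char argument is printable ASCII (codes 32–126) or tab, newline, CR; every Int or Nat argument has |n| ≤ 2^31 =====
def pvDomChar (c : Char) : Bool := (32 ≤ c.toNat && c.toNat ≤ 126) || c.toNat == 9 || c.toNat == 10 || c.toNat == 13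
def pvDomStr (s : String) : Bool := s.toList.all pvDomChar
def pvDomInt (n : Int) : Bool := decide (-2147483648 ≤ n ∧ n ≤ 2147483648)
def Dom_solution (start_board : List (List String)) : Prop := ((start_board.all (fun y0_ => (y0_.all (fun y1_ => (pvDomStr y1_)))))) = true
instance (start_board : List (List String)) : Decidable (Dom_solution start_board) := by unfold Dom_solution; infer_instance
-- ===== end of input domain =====

-- B replaces A's breadth-first queue search with its early goal exit by a stack-driven
-- (depth-first) saturation of the whole reachable component followed by a single membership
-- test of the goal state, parses the board by one comprehension + filter instead of A's two
-- nested appending loops, and tests occupancy against a precomputed position set instead of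
-- A's inner any() scan; objective: alternative (same exact answers, no speed claim).

-- ===== PORT A =====
-- a state is the Python tuple of (x, y, color) knight triples, kept sorted by key (color, x, y)
abbrev KS := List (Int × Int × String)

-- key=lambda x: (x[2], x[0], x[1]) — Python's lexicographic tuple order is the Lex product
-- order, with the string compared code-point-lexicographically (Lean's order on List Char)
def solKey (t : Int × Int × String) : Lex (List Char × Lex (Int × Int)) :=
  toLex (t.2.2.toList, toLex (t.1, t.2.1))

def solMoves : List (Int × Int) :=
  [(-1, 2), (1, 2), (-2, 1), (-2, -1), (2, -1), (2, 1), (-1, -2), (1, -2)]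

-- the two nested `for i/for j` loops appending to `start` and `goal`
def solParse (start_board : List (List String)) : KS × KS :=
  (PySem.List.pyRange 0 3 1).foldl (fun acc i =>
    (PySem.List.pyRange 0 3 1).foldl (fun acc j =>
      let c := PySem.List.pyGetD (PySem.List.pyGetD start_board i []) j ""
      if c = "1" then (acc.1 ++ [(i, j, "1")], acc.2 ++ [(i, j, "2")])
      else if c = "2" then (acc.1 ++ [(i, j, "2")], acc.2 ++ [(i, j, "1")])
      else acc) acc) ([], [])

-- the body of the while loop: both inner `for` loops over the popped state `cur`,
-- threading (seen, queue-after-popleft)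
def solExpand (cur : KS) (acc : PySem.Set KS × List KS) : PySem.Set KS × List KS :=
  (PySem.List.enumerate cur).foldl (fun acc p =>
    solMoves.foldl (fun acc m =>
      let nx := p.2.1 + m.1
      let ny := p.2.2.1 + m.2
      if 0 ≤ nx ∧ nx < 3 ∧ 0 ≤ ny ∧ ny < 3 then
        if ¬ (cur.any fun t => nx == t.1 && ny == t.2.1) then
          let new_state := PySem.List.sorted (PySem.List.pySetD cur p.1 (nx, ny, p.2.2.2)) solKey
          if new_state ∈ acc.1 then acc
          else (PySem.Set.add acc.1 new_state, acc.2 ++ [new_state])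
        else acc
      else acc) acc) acc

-- `while queue:` — fuel-guarded recursion; the fuel 262146 exceeds the number of
-- distinct states (≤ 2^18) ever enqueued, so the 0-fuel branch is never reached
def solBfs (goal : KS) : Nat → List KS → PySem.Set KS → String
  | 0, _, _ => "impossible"
  | fuel + 1, queue, seen =>
    match queue with
    | [] => "impossible"
    | cur :: rest =>
      if cur = goal then "possible"
      else
        let r := solExpand cur (seen, rest)
        solBfs goal fuel r.2 r.1

def solution (start_board : List (List String)) : String :=
  let p := solParse start_board
  let start := PySem.List.sorted p.1 solKey
  let goal := PySem.List.sorted p.2 solKey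
  solBfs goal 262146 [start] (PySem.Set.add PySem.Set.empty start)

-- ===== PORT B =====
-- (B uses the same knight-move table and the same (color, x, y) sort key as A — they are the
-- problem's data — so its port reuses solMoves and solKey)
-- cells = [(i, j, start_board[i][j]) for i in range(3) for j in range(3)]
def altCells (start_board : List (List String)) : KS :=
  (PySem.List.pyRange 0 3 1).flatMap (fun i =>
    (PySem.List.pyRange 0 3 1).map (fun j =>
      (i, j, PySem.List.pyGetD (PySem.List.pyGetD start_board i []) j "")))

def altStartRaw (start_board : List (List String)) : KS :=
  (altCells start_board).filter (fun t => t.2.2 == "1" || t.2.2 == "2")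

def altGoalRaw (start_board : List (List String)) : KS :=
  ((altCells start_board).filter (fun t => t.2.2 == "1" || t.2.2 == "2")).map
    (fun t => (t.1, t.2.1, if t.2.2 == "1" then "2" else "1"))

-- one popped state expanded: occupancy set + slice-rebuilt successor states,
-- threading (states, stack-after-pop)
def altExpand (s : KS) (acc : PySem.Set KS × List KS) : PySem.Set KS × List KS :=
  let occ : PySem.Set (Int × Int) := PySem.Set.ofList (s.map (fun t => (t.1, t.2.1)))
  (PySem.List.enumerate s).foldl (fun acc p =>
    solMoves.foldl (fun acc m =>
      let nx := p.2.1 + m.1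
      let ny := p.2.2.1 + m.2
      if 0 ≤ nx ∧ nx < 3 ∧ 0 ≤ ny ∧ ny < 3 ∧ (nx, ny) ∉ occ then
        let t := PySem.List.sorted
          (PySem.List.slice s none (some p.1) ++ [(nx, ny, p.2.2.2)] ++
            PySem.List.slice s (some (p.1 + 1)) none) solKey
        if t ∈ acc.1 then acc
        else (PySem.Set.add acc.1 t, acc.2 ++ [t])
      else acc) acc) acc

-- `while stack: s = stack.pop()` — LIFO; fuel-guarded exactly as in port A (never exhausted)
def altLoop : Nat → List KS → PySem.Set KS → PySem.Set KS
  | 0, _, states => states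
  | fuel + 1, stack, states =>
    if h : stack = [] then states
    else
      let s := stack.getLast h
      let r := altExpand s (states, stack.dropLast)
      altLoop fuel r.2 r.1

def solution_alt (start_board : List (List String)) : String :=
  let start := PySem.List.sorted (altStartRaw start_board) solKey
  let goal := PySem.List.sorted (altGoalRaw start_board) solKey
  let final := altLoop 262146 [start] (PySem.Set.ofList [start])
  if goal ∈ final then "possible" else "impossible"

-- ===== PRECONDITION & SPEC =====
-- A indexes start_board[i][j] for i, j in range(3): it raises IndexError unless the board has
-- at least 3 rows whose first three rows each have at least 3 entries; Pre_ excludes exactly those.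
def Pre_solution (start_board : List (List String)) : Prop :=
  3 ≤ start_board.length ∧ ∀ row ∈ start_board.take 3, 3 ≤ row.length
instance (start_board : List (List String)) : Decidable (Pre_solution start_board) := by
  unfold Pre_solution; infer_instance

def pvWitness_solution : List (List String) :=
  [["1", "0", "0"], ["0", "0", "0"], ["0", "0", "0"]]

def Spec_solution (start_board : List (List String)) (out : String) : Prop :=
  out = solution_alt start_board
instance (start_board : List (List String)) (out : String) : Decidable (Spec_solution start_board out) := by
  unfold Spec_solution; infer_instance

-- ===== CLAIM (what is proved, stated in full; the proofs are below) =====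
def Claim_equal_solution : Prop := ∀ (start_board : List (List String)),
  Dom_solution start_board → Pre_solution start_board →
  Spec_solution start_board (solution start_board)

-- ===== LEMMAS AND PROOFS =====

-- ---------- proof-side vocabulary ----------

-- the nine board cells in (color-irrelevant) scan order
def pvAllPairs : List (Int × Int) :=
  [(0,0),(0,1),(0,2),(1,0),(1,1),(1,2),(2,0),(2,1),(2,2)]

def pvCell (b : List (List String)) (p : Int × Int) : String :=
  PySem.List.pyGetD (PySem.List.pyGetD b p.1 []) p.2 ""

def pvHS (b : List (List String)) (p : Int × Int) : Option (Int × Int × String) :=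
  if pvCell b p = "1" then some (p.1, p.2, "1")
  else if pvCell b p = "2" then some (p.1, p.2, "2") else none

def pvHG (b : List (List String)) (p : Int × Int) : Option (Int × Int × String) :=
  if pvCell b p = "1" then some (p.1, p.2, "2")
  else if pvCell b p = "2" then some (p.1, p.2, "1") else none

def pvRawS (b : List (List String)) : KS := pvAllPairs.filterMap (pvHS b)
def pvRawG (b : List (List String)) : KS := pvAllPairs.filterMap (pvHG b)

-- valid states: in-board coordinates, colors "1"/"2", distinct positions, strictly key-sorted
def pvOK (s : KS) : Prop :=
  (∀ t ∈ s, (0:Int) ≤ t.1 ∧ t.1 < 3 ∧ (0:Int) ≤ t.2.1 ∧ t.2.1 < 3 ∧ (t.2.2 = "1" ∨ t.2.2 = "2")) ∧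
  (s.map (fun t => (t.1, t.2.1))).Nodup ∧
  s.Pairwise (fun a b => solKey a < solKey b)

-- the successor relation: all states A's inner loops generate from s
def pvPairs (s : KS) : List ((Int × (Int × Int × String)) × (Int × Int)) :=
  (PySem.List.enumerate s).flatMap (fun p => solMoves.map (fun m => (p, m)))

def pvH (s : KS) (pm : (Int × (Int × Int × String)) × (Int × Int)) : Option KS :=
  let nx := pm.1.2.1 + pm.2.1
  let ny := pm.1.2.2.1 + pm.2.2
  if 0 ≤ nx ∧ nx < 3 ∧ 0 ≤ ny ∧ ny < 3 ∧ (∀ t ∈ s, ¬(nx = t.1 ∧ ny = t.2.1)) then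
    some (PySem.List.sorted (PySem.List.pySetD s pm.1.1 (nx, ny, pm.1.2.2.2)) solKey)
  else none

def pvSucc (s : KS) : List KS := (pvPairs s).filterMap (pvH s)

def pvStep (s t : KS) : Prop := t ∈ pvSucc s
def pvReach (s t : KS) : Prop := Relation.ReflTransGen pvStep s t

-- the common shape of both expansion loops
def pvGStep {I : Type} (h : I → Option KS) (acc : PySem.Set KS × List KS) (x : I) :
    PySem.Set KS × List KS :=
  match h x with
  | some v => if v ∈ acc.1 then acc else (PySem.Set.add acc.1 v, acc.2 ++ [v])
  | none => acc

-- ---------- parse lemmas ----------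

lemma pv_stepA (b : List (List String)) (acc : KS × KS) (i j : Int) :
    (if PySem.List.pyGetD (PySem.List.pyGetD b i []) j "" = "1" then
        (acc.1 ++ [(i, j, "1")], acc.2 ++ [(i, j, "2")])
      else if PySem.List.pyGetD (PySem.List.pyGetD b i []) j "" = "2" then
        (acc.1 ++ [(i, j, "2")], acc.2 ++ [(i, j, "1")])
      else acc) =
    (acc.1 ++ (pvHS b (i, j)).toList, acc.2 ++ (pvHG b (i, j)).toList) := by
  simp only [pvHS, pvHG, pvCell]
  by_cases h1 : PySem.List.pyGetD (PySem.List.pyGetD b i []) j "" = "1"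
  · simp [h1]
  · by_cases h2 : PySem.List.pyGetD (PySem.List.pyGetD b i []) j "" = "2" <;> simp [h1, h2]

lemma pv_parseA_eq (b : List (List String)) : solParse b = (pvRawS b, pvRawG b) := by
  have hr : PySem.List.pyRange 0 3 1 = [0, 1, 2] := by decide
  unfold solParse
  rw [hr]
  simp only [List.foldl_cons, List.foldl_nil, pv_stepA]
  rw [pvRawS, pvRawG, List.filterMap_eq_flatMap_toList, List.filterMap_eq_flatMap_toList]
  simp [pvAllPairs, List.append_assoc]

lemma pv_filterS (cells : KS) :
    cells.filter (fun t => t.2.2 == "1" || t.2.2 == "2") =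
      cells.flatMap (fun t =>
        (if t.2.2 = "1" then some (t.1, t.2.1, "1")
         else if t.2.2 = "2" then some (t.1, t.2.1, "2") else none).toList) := by
  induction cells with
  | nil => rfl
  | cons t rest ih =>
    obtain ⟨x, y, c⟩ := t
    by_cases h1 : c = "1"
    · subst h1; simp [List.filter_cons, ih]
    · by_cases h2 : c = "2"
      · subst h2; simp [List.filter_cons, h1, ih]
      · simp [List.filter_cons, h1, h2, ih]

lemma pv_filterG (cells : KS) :
    (cells.filter (fun t => t.2.2 == "1" || t.2.2 == "2")).map
        (fun t => (t.1, t.2.1, if t.2.2 == "1" then "2" else "1")) =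
      cells.flatMap (fun t =>
        (if t.2.2 = "1" then some (t.1, t.2.1, "2")
         else if t.2.2 = "2" then some (t.1, t.2.1, "1") else none).toList) := by
  induction cells with
  | nil => rfl
  | cons t rest ih =>
    obtain ⟨x, y, c⟩ := t
    simp only [beq_iff_eq] at ih ⊢
    by_cases h1 : c = "1"
    · subst h1; simp [List.filter_cons, ih]
    · by_cases h2 : c = "2"
      · subst h2; simp [List.filter_cons, h1, ih]
      · simp [List.filter_cons, h1, h2, ih]

lemma pv_parseB_S (b : List (List String)) (hb : Pre_solution b) : altStartRaw b = pvRawS b := by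
  have hr : PySem.List.pyRange 0 3 1 = [0, 1, 2] := by decide
  obtain ⟨hlen, hrows⟩ := hb
  rcases b with _ | ⟨r0, b⟩; · simp at hlen
  rcases b with _ | ⟨r1, b⟩; · simp at hlen
  rcases b with _ | ⟨r2, b⟩; · simp at hlen
  have h0 : 3 ≤ r0.length := hrows r0 (by simp)
  have h1 : 3 ≤ r1.length := hrows r1 (by simp)
  have h2 : 3 ≤ r2.length := hrows r2 (by simp)
  rcases r0 with _ | ⟨a00, r0⟩; · simp at h0
  rcases r0 with _ | ⟨a01, r0⟩; · simp at h0
  rcases r0 with _ | ⟨a02, r0⟩; · simp at h0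
  rcases r1 with _ | ⟨a10, r1⟩; · simp at h1
  rcases r1 with _ | ⟨a11, r1⟩; · simp at h1
  rcases r1 with _ | ⟨a12, r1⟩; · simp at h1
  rcases r2 with _ | ⟨a20, r2⟩; · simp at h2
  rcases r2 with _ | ⟨a21, r2⟩; · simp at h2
  rcases r2 with _ | ⟨a22, r2⟩; · simp at h2
  rw [altStartRaw, pv_filterS, pvRawS, List.filterMap_eq_flatMap_toList, altCells, hr]
  simp only [pvAllPairs, pvHS, pvCell]
  norm_num [List.flatMap_cons, PySem.List.pyGetD_zero_cons, PySem.List.pyGetD_ofNat',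
    List.append_assoc]

lemma pv_parseB_G (b : List (List String)) (hb : Pre_solution b) : altGoalRaw b = pvRawG b := by
  have hr : PySem.List.pyRange 0 3 1 = [0, 1, 2] := by decide
  obtain ⟨hlen, hrows⟩ := hb
  rcases b with _ | ⟨r0, b⟩; · simp at hlen
  rcases b with _ | ⟨r1, b⟩; · simp at hlen
  rcases b with _ | ⟨r2, b⟩; · simp at hlen
  have h0 : 3 ≤ r0.length := hrows r0 (by simp)
  have h1 : 3 ≤ r1.length := hrows r1 (by simp)
  have h2 : 3 ≤ r2.length := hrows r2 (by simp)
  rcases r0 with _ | ⟨a00, r0⟩; · simp at h0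
  rcases r0 with _ | ⟨a01, r0⟩; · simp at h0
  rcases r0 with _ | ⟨a02, r0⟩; · simp at h0
  rcases r1 with _ | ⟨a10, r1⟩; · simp at h1
  rcases r1 with _ | ⟨a11, r1⟩; · simp at h1
  rcases r1 with _ | ⟨a12, r1⟩; · simp at h1
  rcases r2 with _ | ⟨a20, r2⟩; · simp at h2
  rcases r2 with _ | ⟨a21, r2⟩; · simp at h2
  rcases r2 with _ | ⟨a22, r2⟩; · simp at h2
  rw [altGoalRaw, pv_filterG, pvRawG, List.filterMap_eq_flatMap_toList, altCells, hr]
  simp only [pvAllPairs, pvHG, pvCell]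
  norm_num [List.flatMap_cons, PySem.List.pyGetD_zero_cons, PySem.List.pyGetD_ofNat',
    List.append_assoc]

-- ---------- validity ----------

lemma pv_map_key_nodup (s : KS) (h : (s.map (fun t => (t.1, t.2.1))).Nodup) :
    (s.map solKey).Nodup := by
  have heq : s.map (fun t => (t.1, t.2.1)) =
      (s.map solKey).map (fun k => ofLex (ofLex k).2) := by
    rw [List.map_map]; rfl
  rw [heq] at h
  exact List.Nodup.of_map _ h

lemma pv_pairwise_lt_of_le (s : KS) (hnd : (s.map solKey).Nodup)
    (hle : s.Pairwise (fun a b => solKey a ≤ solKey b)) :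
    s.Pairwise (fun a b => solKey a < solKey b) := by
  have hne : s.Pairwise (fun a b => solKey a ≠ solKey b) := List.pairwise_map.mp hnd
  exact (hle.and hne).imp (fun h => lt_of_le_of_ne h.1 h.2)

lemma pv_ok_sorted (l : KS)
    (hmem : ∀ t ∈ l, (0:Int) ≤ t.1 ∧ t.1 < 3 ∧ (0:Int) ≤ t.2.1 ∧ t.2.1 < 3 ∧ (t.2.2 = "1" ∨ t.2.2 = "2"))
    (hnd : (l.map (fun t => (t.1, t.2.1))).Nodup) :
    pvOK (PySem.List.sorted l solKey) := by
  have hperm := PySem.List.sorted_perm l solKey false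
  refine ⟨?_, ?_, ?_⟩
  · intro t ht
    exact hmem t (hperm.mem_iff.1 ht)
  · exact ((hperm.map (fun t => (t.1, t.2.1))).nodup_iff).2 hnd
  · refine pv_pairwise_lt_of_le _ ?_ (PySem.List.sorted_pairwise l solKey)
    refine ((hperm.map solKey).nodup_iff).2 ?_
    exact pv_map_key_nodup l hnd

lemma pv_filterMap_guard {A : Type} (q : A → Prop) [DecidablePred q] :
    ∀ l : List A, (l.filterMap (fun a => if q a then some a else none)) =
      l.filter (fun a => decide (q a)) := by
  intro l
  induction l with
  | nil => rfl
  | cons a t ih => by_cases h : q a <;> simp [List.filter_cons, h, ih]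

lemma pv_raw_elem (b : List (List String)) (h : (Int × Int) → Option (Int × Int × String))
    (hh : ∀ p t, h p = some t → t.1 = p.1 ∧ t.2.1 = p.2 ∧ (t.2.2 = "1" ∨ t.2.2 = "2")) :
    ∀ t ∈ pvAllPairs.filterMap h,
      (0:Int) ≤ t.1 ∧ t.1 < 3 ∧ (0:Int) ≤ t.2.1 ∧ t.2.1 < 3 ∧ (t.2.2 = "1" ∨ t.2.2 = "2") := by
  intro t ht
  obtain ⟨p, hp, hsome⟩ := List.mem_filterMap.1 ht
  obtain ⟨h1, h2, h3⟩ := hh p t hsome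
  have hball : ∀ q ∈ pvAllPairs, (0:Int) ≤ q.1 ∧ q.1 < 3 ∧ (0:Int) ≤ q.2 ∧ q.2 < 3 := by decide
  have hb := hball p hp
  exact ⟨h1 ▸ hb.1, h1 ▸ hb.2.1, h2 ▸ hb.2.2.1, h2 ▸ hb.2.2.2, h3⟩

lemma pv_raw_nodup (b : List (List String)) (h : (Int × Int) → Option (Int × Int × String))
    (hh : ∀ p t, h p = some t → t.1 = p.1 ∧ t.2.1 = p.2) :
    ((pvAllPairs.filterMap h).map (fun t => (t.1, t.2.1))).Nodup := by
  have hmaps : ((pvAllPairs.filterMap h).map (fun t => (t.1, t.2.1))).Sublist pvAllPairs := by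
    rw [List.map_filterMap]
    have : ∀ p ∈ pvAllPairs, ((h p).map (fun t => (t.1, t.2.1))) =
        (if (h p).isSome then some p else none) := by
      intro p _
      cases hp : h p with
      | none => rfl
      | some t =>
        obtain ⟨h1, h2⟩ := hh p t hp
        simp [Option.map_some, h1, h2]
    rw [List.filterMap_congr this, pv_filterMap_guard]
    exact List.filter_sublist
  exact hmaps.nodup (by decide)

lemma pv_hs_shape (b : List (List String)) :
    ∀ p t, pvHS b p = some t → t.1 = p.1 ∧ t.2.1 = p.2 ∧ (t.2.2 = "1" ∨ t.2.2 = "2") := by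
  intro p t h
  unfold pvHS at h
  split_ifs at h with h1 h2 <;> cases h
  · exact ⟨rfl, rfl, Or.inl rfl⟩
  · exact ⟨rfl, rfl, Or.inr rfl⟩

lemma pv_ok_rawS (b : List (List String)) : pvOK (PySem.List.sorted (pvRawS b) solKey) := by
  refine pv_ok_sorted _ (pv_raw_elem b _ (pv_hs_shape b)) (pv_raw_nodup b _ ?_)
  intro p t h
  exact ⟨(pv_hs_shape b p t h).1, (pv_hs_shape b p t h).2.1⟩

lemma pv_succ_ok (s t : KS) (hs : pvOK s) (ht : t ∈ pvSucc s) : pvOK t := by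
  obtain ⟨pm, hpm, hsome⟩ := List.mem_filterMap.1 ht
  obtain ⟨p, hp, hpm2⟩ := List.mem_flatMap.1 hpm
  obtain ⟨pm', hm, rfl⟩ := List.mem_map.1 hpm2
  obtain ⟨k, hk, rfl⟩ := (PySem.List.mem_enumerate_iff s 0 p).1 hp
  rw [pvH] at hsome
  split_ifs at hsome with hcond
  obtain ⟨hb1, hb2, hb3, hb4, hemp⟩ := hcond
  cases hsome
  simp only [zero_add] at *
  rw [PySem.List.pySetD_natCast]
  refine pv_ok_sorted _ ?_ ?_
  · intro x hx
    rcases List.mem_or_eq_of_mem_set hx with hx | rfl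
    · exact hs.1 x hx
    · exact ⟨hb1, hb2, hb3, hb4, (hs.1 s[k] (List.getElem_mem hk)).2.2.2.2⟩
  · rw [List.map_set]
    refine List.Nodup.set hs.2.1 ?_
    intro hmem
    obtain ⟨x, hxmem, hxeq⟩ := List.mem_map.1 hmem
    have h1 : x.1 = s[k].1 + pm'.1 := congrArg Prod.fst hxeq
    have h2 : x.2.1 = s[k].2.1 + pm'.2 := congrArg Prod.snd hxeq
    exact hemp x hxmem ⟨h1.symm, h2.symm⟩

-- ---------- counting ----------

def pvU : KS :=
  [(0,0,"1"),(0,1,"1"),(0,2,"1"),(1,0,"1"),(1,1,"1"),(1,2,"1"),(2,0,"1"),(2,1,"1"),(2,2,"1"),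
   (0,0,"2"),(0,1,"2"),(0,2,"2"),(1,0,"2"),(1,1,"2"),(1,2,"2"),(2,0,"2"),(2,1,"2"),(2,2,"2")]

lemma pv_sublist {A K : Type} [LinearOrder K] (key : A → K) :
    ∀ (u l : List A), l.Pairwise (fun a b => key a < key b) →
      u.Pairwise (fun a b => key a < key b) → (∀ x ∈ l, x ∈ u) → l.Sublist u := by
  intro u
  induction u with
  | nil =>
    intro l _ _ hsub
    cases l with
    | nil => exact List.Sublist.refl []
    | cons a l' => exact absurd (hsub a List.mem_cons_self) (List.not_mem_nil)
  | cons b u' ih =>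
    intro l hl hu hsub
    cases l with
    | nil => exact List.nil_sublist _
    | cons a l' =>
      obtain ⟨hab, hl'⟩ := List.pairwise_cons.1 hl
      obtain ⟨hbu, hu'⟩ := List.pairwise_cons.1 hu
      rcases List.mem_cons.1 (hsub a List.mem_cons_self) with rfl | hau'
      · refine List.Sublist.cons₂ a (ih l' hl' hu' ?_)
        intro x hx
        rcases List.mem_cons.1 (hsub x (List.mem_cons_of_mem a hx)) with rfl | h
        · exact absurd (hab x hx) (lt_irrefl _)
        · exact h
      · refine List.Sublist.cons b (ih (a :: l') hl hu' ?_)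
        intro x hx
        rcases List.mem_cons.1 (hsub x hx) with rfl | h
        · exfalso
          rcases List.mem_cons.1 hx with rfl | hx'
          · exact lt_irrefl _ (hbu x hau')
          · exact lt_irrefl _ (lt_trans (hbu a hau') (hab x hx'))
        · exact h

lemma pv_ok_sublist (s : KS) (h : pvOK s) : s.Sublist pvU := by
  refine pv_sublist solKey pvU s h.2.2 (by decide) ?_
  intro x hx
  obtain ⟨hx1, hx2, hx3, hx4, hx5⟩ := h.1 x hx
  obtain ⟨x1, x2, x3⟩ := x
  simp only at hx1 hx2 hx3 hx4 hx5
  have e1 : x1 = 0 ∨ x1 = 1 ∨ x1 = 2 := by omega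
  have e2 : x2 = 0 ∨ x2 = 1 ∨ x2 = 2 := by omega
  rcases hx5 with rfl | rfl <;> rcases e1 with rfl | rfl | rfl <;>
    rcases e2 with rfl | rfl | rfl <;> decide

lemma pv_bound (seen : List KS) (hnd : seen.Nodup) (hok : ∀ s ∈ seen, pvOK s) :
    seen.length ≤ 262144 := by
  have hsub : ∀ s ∈ seen, s ∈ pvU.sublists :=
    fun s h => List.mem_sublists.2 (pv_ok_sublist s (hok s h))
  have hfin : seen.toFinset ⊆ (pvU.sublists).toFinset := by
    intro x hx
    rw [List.mem_toFinset] at hx ⊢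
    exact hsub x hx
  calc seen.length = seen.toFinset.card := (List.toFinset_card_of_nodup hnd).symm
    _ ≤ (pvU.sublists).toFinset.card := Finset.card_le_card hfin
    _ ≤ (pvU.sublists).length := List.toFinset_card_le _
    _ = 2 ^ pvU.length := List.length_sublists _
    _ = 262144 := by norm_num [pvU]

-- ---------- the generic expansion fold ----------

lemma pv_expand_gen {I : Type} (h : I → Option KS) :
    ∀ (l : List I) (seen q : List KS),
    ∃ new : List KS,
      l.foldl (pvGStep h) (seen, q) = (seen ++ new, q ++ new) ∧
      (∀ t : KS, t ∈ seen ++ new ↔ t ∈ seen ∨ t ∈ l.filterMap h) ∧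
      (∀ t ∈ new, t ∉ seen ∧ t ∈ l.filterMap h) ∧
      (seen.Nodup → (seen ++ new).Nodup) := by
  intro l
  induction l with
  | nil =>
    intro seen q
    exact ⟨[], by simp⟩
  | cons x l ih =>
    intro seen q
    simp only [List.foldl_cons, List.filterMap_cons]
    cases hx : h x with
    | none =>
      obtain ⟨new, h1, h2, h3, h4⟩ := ih seen q
      refine ⟨new, ?_, h2, h3, h4⟩
      simpa only [pvGStep, hx] using h1
    | some v =>
      by_cases hv : v ∈ seen
      · obtain ⟨new, h1, h2, h3, h4⟩ := ih seen q
        refine ⟨new, ?_, ?_, ?_, h4⟩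
        · simpa only [pvGStep, hx, if_pos hv] using h1
        · intro t
          rw [h2]
          constructor
          · rintro (ht | ht)
            · exact Or.inl ht
            · exact Or.inr (List.mem_cons_of_mem _ ht)
          · rintro (ht | ht)
            · exact Or.inl ht
            · rcases List.mem_cons.1 ht with rfl | ht
              · exact Or.inl hv
              · exact Or.inr ht
        · intro t ht
          obtain ⟨hns, hf⟩ := h3 t ht
          exact ⟨hns, List.mem_cons_of_mem _ hf⟩
      · obtain ⟨new, h1, h2, h3, h4⟩ := ih (seen ++ [v]) (q ++ [v])
        refine ⟨v :: new, ?_, ?_, ?_, ?_⟩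
        · have hstep : pvGStep h (seen, q) x = (seen ++ [v], q ++ [v]) := by
            simp only [pvGStep, hx, if_neg hv]
            rw [PySem.Set.add_of_not_mem hv]
          rw [hstep, h1]
          simp
        · intro t
          have := h2 t
          simp only [List.mem_append, List.mem_singleton, List.mem_cons] at this ⊢
          tauto
        · intro t ht
          rcases List.mem_cons.1 ht with rfl | ht
          · exact ⟨hv, List.mem_cons_self⟩
          · obtain ⟨hns, hf⟩ := h3 t ht
            simp only [List.mem_append, List.mem_singleton] at hns
            push Not at hns
            exact ⟨hns.1, List.mem_cons_of_mem _ hf⟩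
        · intro hnd
          have : (seen ++ [v]).Nodup := by
            simp [List.nodup_append, hnd]
            intro a ha hav
            exact hv (hav ▸ ha)
          have := h4 this
          simpa using this

lemma pv_anyiff (cur : KS) (nx ny : Int) :
    (¬ (cur.any fun t => nx == t.1 && ny == t.2.1) = true) ↔
      ∀ t ∈ cur, ¬(nx = t.1 ∧ ny = t.2.1) := by
  rw [List.any_eq_true]
  simp only [Bool.and_eq_true, beq_iff_eq]
  constructor
  · intro h t ht hc
    exact h ⟨t, ht, hc.1, hc.2⟩
  · rintro h ⟨t, ht, hc1, hc2⟩
    exact h t ht ⟨hc1, hc2⟩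

lemma pv_occiff (s : KS) (nx ny : Int) :
    ((nx, ny) ∉ PySem.Set.ofList (s.map (fun t => (t.1, t.2.1)))) ↔
      ∀ t ∈ s, ¬(nx = t.1 ∧ ny = t.2.1) := by
  constructor
  · intro h t ht hc
    refine h ((PySem.Set.mem_ofList _ _).2 (List.mem_map.2 ⟨t, ht, ?_⟩))
    rw [← hc.1, ← hc.2]
  · intro h hmem
    obtain ⟨t, ht, hpr⟩ := List.mem_map.1 ((PySem.Set.mem_ofList _ _).1 hmem)
    have h1 : t.1 = nx := congrArg Prod.fst hpr
    have h2 : t.2.1 = ny := congrArg Prod.snd hpr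
    exact h t ht ⟨h1.symm, h2.symm⟩

lemma pv_slice_set (s : KS) (k : Nat) (hk : k < s.length) (v : Int × Int × String) :
    PySem.List.slice s none (some (k : Int)) ++ [v] ++
      PySem.List.slice s (some ((k : Int) + 1)) none = PySem.List.pySetD s (k : Int) v := by
  have h1 : ((k : Int)) + 1 = ((k + 1 : Nat) : Int) := by push_cast; ring
  rw [h1, PySem.List.slice_to_natCast, PySem.List.slice_from_natCast, PySem.List.pySetD_natCast,
    List.set_eq_take_append_cons_drop, if_pos hk]
  simp

lemma pv_expandA_eq (cur : KS) (acc : PySem.Set KS × List KS) :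
    solExpand cur acc = (pvPairs cur).foldl (pvGStep (pvH cur)) acc := by
  rw [pvPairs, List.foldl_flatMap]
  unfold solExpand
  refine PySem.List.foldl_congr_mem _ _ _ _ ?_
  intro acc p _
  rw [List.foldl_map]
  refine PySem.List.foldl_congr_mem _ _ _ _ ?_
  intro acc m _
  simp only [pvGStep, pvH]
  by_cases h1 : (0:Int) ≤ p.2.1 + m.1 ∧ p.2.1 + m.1 < 3 ∧ (0:Int) ≤ p.2.2.1 + m.2 ∧ p.2.2.1 + m.2 < 3
  · by_cases h2 : ∀ t ∈ cur, ¬(p.2.1 + m.1 = t.1 ∧ p.2.2.1 + m.2 = t.2.1)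
    · have hc : (0:Int) ≤ p.2.1 + m.1 ∧ p.2.1 + m.1 < 3 ∧ (0:Int) ≤ p.2.2.1 + m.2 ∧
          p.2.2.1 + m.2 < 3 ∧ ∀ t ∈ cur, ¬(p.2.1 + m.1 = t.1 ∧ p.2.2.1 + m.2 = t.2.1) :=
        ⟨h1.1, h1.2.1, h1.2.2.1, h1.2.2.2, h2⟩
      rw [if_pos hc, if_pos h1, if_pos ((pv_anyiff cur _ _).2 h2)]
    · have hcn : ¬((0:Int) ≤ p.2.1 + m.1 ∧ p.2.1 + m.1 < 3 ∧ (0:Int) ≤ p.2.2.1 + m.2 ∧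
          p.2.2.1 + m.2 < 3 ∧ ∀ t ∈ cur, ¬(p.2.1 + m.1 = t.1 ∧ p.2.2.1 + m.2 = t.2.1)) :=
        fun hc => h2 hc.2.2.2.2
      rw [if_neg hcn, if_pos h1, if_neg (fun hx => h2 ((pv_anyiff cur _ _).1 hx))]
  · have hcn : ¬((0:Int) ≤ p.2.1 + m.1 ∧ p.2.1 + m.1 < 3 ∧ (0:Int) ≤ p.2.2.1 + m.2 ∧
        p.2.2.1 + m.2 < 3 ∧ ∀ t ∈ cur, ¬(p.2.1 + m.1 = t.1 ∧ p.2.2.1 + m.2 = t.2.1)) :=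
      fun hc => h1 ⟨hc.1, hc.2.1, hc.2.2.1, hc.2.2.2.1⟩
    rw [if_neg hcn, if_neg h1]

lemma pv_expandB_eq (s : KS) (acc : PySem.Set KS × List KS) :
    altExpand s acc = (pvPairs s).foldl (pvGStep (pvH s)) acc := by
  rw [pvPairs, List.foldl_flatMap]
  dsimp only [altExpand]
  refine PySem.List.foldl_congr_mem _ _ _ _ ?_
  intro acc p hp
  rw [List.foldl_map]
  refine PySem.List.foldl_congr_mem _ _ _ _ ?_
  intro acc m _
  obtain ⟨k, hk, rfl⟩ := (PySem.List.mem_enumerate_iff s 0 p).1 hp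
  simp only [pvGStep, pvH, zero_add]
  rw [pv_slice_set s k hk]
  by_cases h1 : (0:Int) ≤ s[k].1 + m.1 ∧ s[k].1 + m.1 < 3 ∧ (0:Int) ≤ s[k].2.1 + m.2 ∧
      s[k].2.1 + m.2 < 3
  · by_cases h2 : ∀ t ∈ s, ¬(s[k].1 + m.1 = t.1 ∧ s[k].2.1 + m.2 = t.2.1)
    · have hcB : (0:Int) ≤ s[k].1 + m.1 ∧ s[k].1 + m.1 < 3 ∧ (0:Int) ≤ s[k].2.1 + m.2 ∧
          s[k].2.1 + m.2 < 3 ∧ (s[k].1 + m.1, s[k].2.1 + m.2) ∉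
            PySem.Set.ofList (s.map (fun t => (t.1, t.2.1))) :=
        ⟨h1.1, h1.2.1, h1.2.2.1, h1.2.2.2, (pv_occiff s _ _).2 h2⟩
      have hcH : (0:Int) ≤ s[k].1 + m.1 ∧ s[k].1 + m.1 < 3 ∧ (0:Int) ≤ s[k].2.1 + m.2 ∧
          s[k].2.1 + m.2 < 3 ∧ ∀ t ∈ s, ¬(s[k].1 + m.1 = t.1 ∧ s[k].2.1 + m.2 = t.2.1) :=
        ⟨h1.1, h1.2.1, h1.2.2.1, h1.2.2.2, h2⟩
      rw [if_pos hcH, if_pos hcB]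
    · have hnH : ¬((0:Int) ≤ s[k].1 + m.1 ∧ s[k].1 + m.1 < 3 ∧ (0:Int) ≤ s[k].2.1 + m.2 ∧
          s[k].2.1 + m.2 < 3 ∧ ∀ t ∈ s, ¬(s[k].1 + m.1 = t.1 ∧ s[k].2.1 + m.2 = t.2.1)) :=
        fun hc => h2 hc.2.2.2.2
      have hnB : ¬((0:Int) ≤ s[k].1 + m.1 ∧ s[k].1 + m.1 < 3 ∧ (0:Int) ≤ s[k].2.1 + m.2 ∧
          s[k].2.1 + m.2 < 3 ∧ (s[k].1 + m.1, s[k].2.1 + m.2) ∉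
            PySem.Set.ofList (s.map (fun t => (t.1, t.2.1)))) :=
        fun hc => h2 ((pv_occiff s _ _).1 hc.2.2.2.2)
      rw [if_neg hnH, if_neg hnB]
  · rw [if_neg (fun hc => h1 ⟨hc.1, hc.2.1, hc.2.2.1, hc.2.2.2.1⟩),
      if_neg (fun hc => h1 ⟨hc.1, hc.2.1, hc.2.2.1, hc.2.2.2.1⟩)]

-- ---------- reachability ----------

lemma pv_closed (start : KS) (seen : List KS) (hstart : start ∈ seen)
    (hcl : ∀ s ∈ seen, ∀ t ∈ pvSucc s, t ∈ seen) :
    ∀ g, pvReach start g → g ∈ seen := by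
  intro g h
  induction h with
  | refl => exact hstart
  | tail _ hstep ih => exact hcl _ ih _ hstep

lemma pv_bfsA_eq_or (goal : KS) : ∀ (fuel : Nat) (queue : List KS) (seen : PySem.Set KS),
    solBfs goal fuel queue seen = "possible" ∨ solBfs goal fuel queue seen = "impossible" := by
  intro fuel
  induction fuel with
  | zero => intro _ _; right; rfl
  | succ n ih =>
    intro queue seen
    match queue with
    | [] => right; rfl
    | cur :: rest =>
      simp only [solBfs]
      split
      · left; rfl
      · exact ih _ _

lemma pv_bfsA_main (start goal : KS) :
    ∀ (fuel : Nat) (queue seen : List KS),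
    (∀ s ∈ queue, s ∈ seen) →
    (∀ s ∈ seen, pvOK s) →
    seen.Nodup →
    (∀ s ∈ seen, pvReach start s) →
    (∀ s ∈ seen, s ∈ queue ∨ ∀ t ∈ pvSucc s, t ∈ seen) →
    (goal ∈ seen → goal ∈ queue) →
    start ∈ seen →
    queue.length + (262144 - seen.length) < fuel →
    (solBfs goal fuel queue seen = "possible" ↔ pvReach start goal) := by
  intro fuel
  induction fuel with
  | zero =>
    intro queue seen _ _ _ _ _ _ _ hfuel
    omega
  | succ n ih =>
    intro queue seen hq hok hnd hreach hclosed hgoal hstart hfuel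
    cases queue with
    | nil =>
      simp only [solBfs]
      constructor
      · intro h
        exact absurd h (by decide)
      · intro hr
        have hcl : ∀ s ∈ seen, ∀ t ∈ pvSucc s, t ∈ seen := by
          intro s hs
          rcases hclosed s hs with h | h
          · exact absurd h (List.not_mem_nil)
          · exact h
        exact absurd (hgoal (pv_closed start seen hstart hcl goal hr)) (List.not_mem_nil)
    | cons cur rest =>
      simp only [solBfs]
      by_cases hg : cur = goal
      · rw [if_pos hg]
        have hr : pvReach start goal := hg ▸ hreach cur (hq cur List.mem_cons_self)
        simp [hr]
      · rw [if_neg hg]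
        have hcur : cur ∈ seen := hq cur List.mem_cons_self
        rw [pv_expandA_eq]
        obtain ⟨new, heq, hmem, hnew, hnd'⟩ := pv_expand_gen (pvH cur) (pvPairs cur) seen rest
        rw [heq]
        have hsuccmem : ∀ t ∈ new, t ∈ pvSucc cur := fun t ht => (hnew t ht).2
        have hok' : ∀ s ∈ seen ++ new, pvOK s := by
          intro s hs
          rcases List.mem_append.1 hs with h | h
          · exact hok s h
          · exact pv_succ_ok cur s (hok cur hcur) (hsuccmem s h)
        have hnd'' := hnd' hnd
        have hb' := pv_bound (seen ++ new) hnd'' hok'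
        refine ih (rest ++ new) (seen ++ new) ?_ hok' hnd'' ?_ ?_ ?_ ?_ ?_
        · intro s hs
          rcases List.mem_append.1 hs with h | h
          · exact List.mem_append.2 (Or.inl (hq s (List.mem_cons_of_mem _ h)))
          · exact List.mem_append.2 (Or.inr h)
        · intro s hs
          rcases List.mem_append.1 hs with h | h
          · exact hreach s h
          · exact Relation.ReflTransGen.tail (hreach cur hcur) (hsuccmem s h)
        · intro s hs
          rcases List.mem_append.1 hs with h | h
          · rcases hclosed s h with h2 | h2
            · rcases List.mem_cons.1 h2 with rfl | h3
              · right
                intro t ht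
                exact (hmem t).2 (Or.inr ht)
              · exact Or.inl (List.mem_append.2 (Or.inl h3))
            · right
              intro t ht
              exact List.mem_append.2 (Or.inl (h2 t ht))
          · exact Or.inl (List.mem_append.2 (Or.inr h))
        · intro hgs
          rcases List.mem_append.1 hgs with h | h
          · rcases List.mem_cons.1 (hgoal h) with rfl | h2
            · exact absurd rfl hg
            · exact List.mem_append.2 (Or.inl h2)
          · exact List.mem_append.2 (Or.inr h)
        · exact List.mem_append.2 (Or.inl hstart)
        · have l1 : (rest ++ new).length = rest.length + new.length := List.length_append ..
          have l2 : (seen ++ new).length = seen.length + new.length := List.length_append ..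
          simp only [List.length_cons] at hfuel
          omega

lemma pv_loopB_main (start : KS) :
    ∀ (fuel : Nat) (stack states : List KS),
    (∀ s ∈ stack, s ∈ states) →
    (∀ s ∈ states, pvOK s) →
    states.Nodup →
    (∀ s ∈ states, pvReach start s) →
    (∀ s ∈ states, s ∈ stack ∨ ∀ t ∈ pvSucc s, t ∈ states) →
    start ∈ states →
    stack.length + (262144 - states.length) < fuel →
    ∀ g, (g ∈ altLoop fuel stack states ↔ pvReach start g) := by
  intro fuel
  induction fuel with
  | zero =>
    intro stack states _ _ _ _ _ _ hfuel
    omega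
  | succ n ih =>
    intro stack states hq hok hnd hreach hclosed hstart hfuel g
    by_cases hs : stack = []
    · subst hs
      simp only [altLoop, dif_pos]
      constructor
      · intro h
        exact hreach g h
      · intro hr
        have hcl : ∀ s ∈ states, ∀ t ∈ pvSucc s, t ∈ states := by
          intro s hsm
          rcases hclosed s hsm with h | h
          · exact absurd h (List.not_mem_nil)
          · exact h
        exact pv_closed start states hstart hcl g hr
    · simp only [altLoop, dif_neg hs]
      have hsplit : stack.dropLast ++ [stack.getLast hs] = stack := List.dropLast_append_getLast hs
      have hcur : stack.getLast hs ∈ states := hq _ (List.getLast_mem hs)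
      rw [pv_expandB_eq]
      obtain ⟨new, heq, hmem, hnew, hnd'⟩ :=
        pv_expand_gen (pvH (stack.getLast hs)) (pvPairs (stack.getLast hs)) states stack.dropLast
      rw [heq]
      have hsuccmem : ∀ t ∈ new, t ∈ pvSucc (stack.getLast hs) := fun t ht => (hnew t ht).2
      have hok' : ∀ s ∈ states ++ new, pvOK s := by
        intro s hsm
        rcases List.mem_append.1 hsm with h | h
        · exact hok s h
        · exact pv_succ_ok _ s (hok _ hcur) (hsuccmem s h)
      have hnd'' := hnd' hnd
      have hb' := pv_bound (states ++ new) hnd'' hok'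
      refine ih (stack.dropLast ++ new) (states ++ new) ?_ hok' hnd'' ?_ ?_ ?_ ?_ g
      · intro s hsm
        rcases List.mem_append.1 hsm with h | h
        · refine List.mem_append.2 (Or.inl (hq s ?_))
          rw [← hsplit]
          exact List.mem_append.2 (Or.inl h)
        · exact List.mem_append.2 (Or.inr h)
      · intro s hsm
        rcases List.mem_append.1 hsm with h | h
        · exact hreach s h
        · exact Relation.ReflTransGen.tail (hreach _ hcur) (hsuccmem s h)
      · intro s hsm
        rcases List.mem_append.1 hsm with h | h
        · rcases hclosed s h with h2 | h2
          · rw [← hsplit] at h2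
            rcases List.mem_append.1 h2 with h3 | h3
            · exact Or.inl (List.mem_append.2 (Or.inl h3))
            · rcases List.mem_cons.1 h3 with rfl | h4
              · right
                intro t ht
                exact (hmem t).2 (Or.inr ht)
              · exact absurd h4 (List.not_mem_nil)
          · right
            intro t ht
            exact List.mem_append.2 (Or.inl (h2 t ht))
        · exact Or.inl (List.mem_append.2 (Or.inr h))
      · exact List.mem_append.2 (Or.inl hstart)
      · have l1 : (stack.dropLast ++ new).length = stack.dropLast.length + new.length :=
          List.length_append ..
        have l2 : (states ++ new).length = states.length + new.length := List.length_append ..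
        have l3 : stack.dropLast.length = stack.length - 1 := List.length_dropLast
        have l4 : 0 < stack.length := List.length_pos_of_ne_nil hs
        omega


theorem solution_spec : Claim_equal_solution := by
  intro b hdom hpre
  unfold Spec_solution solution solution_alt
  dsimp only
  rw [pv_parseA_eq b]
  rw [pv_parseB_S b hpre, pv_parseB_G b hpre]
  dsimp only
  set start := PySem.List.sorted (pvRawS b) solKey with hst
  set goal := PySem.List.sorted (pvRawG b) solKey with hgl
  have hsetA : PySem.Set.add PySem.Set.empty start = [start] := rfl
  have hsetB : PySem.Set.ofList [start] = [start] := rfl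
  rw [hsetA, hsetB]
  have hokS : pvOK start := pv_ok_rawS b
  have hq0 : ∀ s ∈ [start], s ∈ [start] := fun s h => h
  have hok0 : ∀ s ∈ [start], pvOK s := by
    intro s h
    rw [List.mem_singleton.1 h]
    exact hokS
  have hnd0 : ([start] : List KS).Nodup := List.nodup_singleton _
  have hreach0 : ∀ s ∈ [start], pvReach start s := by
    intro s h
    rw [List.mem_singleton.1 h]
    exact Relation.ReflTransGen.refl
  have hclosed0 : ∀ s ∈ [start], s ∈ [start] ∨ ∀ t ∈ pvSucc s, t ∈ [start] :=
    fun s h => Or.inl h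
  have hgoal0 : goal ∈ [start] → goal ∈ [start] := id
  have hstart0 : start ∈ [start] := List.mem_singleton.2 rfl
  have hfuel0 : ([start] : List KS).length + (262144 - ([start] : List KS).length) < 262146 := by
    simp
  have hA := pv_bfsA_main start goal 262146 [start] [start]
    hq0 hok0 hnd0 hreach0 hclosed0 hgoal0 hstart0 hfuel0
  have hB := pv_loopB_main start 262146 [start] [start]
    hq0 hok0 hnd0 hreach0 hclosed0 hstart0 hfuel0 goal
  by_cases hr : pvReach start goal
  · rw [hA.mpr hr, if_pos (hB.mpr hr)]
  · rcases pv_bfsA_eq_or goal 262146 [start] [start] with h1 | h1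
    · exact absurd (hA.mp h1) hr
    · rw [h1, if_neg (fun hc => hr (hB.mp hc))]
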